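-- pv_equiv track=rewrite | github.com/Alex-Sheardown/Recipe_Scraper | Recipe Project/Collections/Version 9/Database and Cleaning/old/initial_check 1.py | split_string_and_number
-- ===== SOURCE A (Python) =====
-- def split_string_and_number(input_string):
--     for i, char in enumerate(input_string):
--         if char.isdigit():
--             first_part = input_string[:i]
--             j = i
--             while j < len(input_string) and (input_string[j].isdigit() or input_string[j] == "." or input_string[j] == "/"or input_string[j] == "_"or input_string[j] == "-"):
--                 j += 1
--             number = input_string[i:j]
--             second_part = input_string[j:]
--             return first_part, number, second_part
--     return input_string, None, ""
-- ===== SOURCE B (Python) =====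
-- import re
--
-- _NUM_SPLIT = re.compile(r"(\D*)(\d[\d./_-]*)(.*)", re.DOTALL)
--
-- def split_string_and_number(input_string):
--     m = _NUM_SPLIT.fullmatch(input_string)
--     if m is None:
--         return input_string, None, ""
--     return m.group(1), m.group(2), m.group(3)
-- ===== Notes on version B (the rewrite author's own statement) =====
-- stated objective: idiomatic
-- what changed: Replaces the manual first-digit scan plus hand-rolled digit-span while-loop with a single precompiled regex fullmatch (\D*)(\d[\d./_-]*)(.*) whose three groups are the prefix, the number token and the remainder.
import Mathlib
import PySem

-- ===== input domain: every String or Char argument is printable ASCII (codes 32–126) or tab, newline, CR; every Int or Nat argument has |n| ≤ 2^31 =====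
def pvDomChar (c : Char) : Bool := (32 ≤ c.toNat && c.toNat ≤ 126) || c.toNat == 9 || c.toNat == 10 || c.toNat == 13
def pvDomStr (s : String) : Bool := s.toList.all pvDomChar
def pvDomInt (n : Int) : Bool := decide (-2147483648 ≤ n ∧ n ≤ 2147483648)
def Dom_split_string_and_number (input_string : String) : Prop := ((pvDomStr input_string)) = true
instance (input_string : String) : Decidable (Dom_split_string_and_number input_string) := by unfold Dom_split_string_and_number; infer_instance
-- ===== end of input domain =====

-- B replaces A's manual first-digit scan + digit-span while-loop with one regex fullmatch
-- (\D*)(\d[\d./_-]*)(.*) (idiomatic; same asymptotic cost).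

-- ===== PORT A =====
-- the inner while-loop: advance j while s[j] is a digit or one of . / _ -
def pvAWhile (cs : List Char) (j : Nat) : Nat :=
  if h : j < cs.length then
    if cs[j].isDigit || cs[j] == '.' || cs[j] == '/' || cs[j] == '_' || cs[j] == '-' then
      pvAWhile cs (j + 1)
    else j
  else j
termination_by cs.length - j

-- the for-loop over enumerate(input_string): first index i with s[i].isdigit()
def pvAFor (cs : List Char) (i : Nat) : String × Option String × String :=
  if h : i < cs.length then
    if cs[i].isDigit then
      let j := pvAWhile cs i
      (String.ofList (cs.take i), some (String.ofList ((cs.drop i).take (j - i))), String.ofList (cs.drop j))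
    else pvAFor cs (i + 1)
  else (String.ofList cs, none, "")
termination_by cs.length - i

def split_string_and_number (input_string : String) : String × Option String × String :=
  pvAFor input_string.toList 0

-- ===== PORT B =====
-- hand port of the regex fullmatch (\D*)(\d[\d./_-]*)(.*) with DOTALL: exact on this
-- pattern — \D* greedily takes the maximal non-digit prefix, \d[\d./_-]* the maximal
-- digit-started token of digits . / _ -, (.*) the rest; no match ⟺ no digit in the string.
def pvIsTok (c : Char) : Bool := c.isDigit || c == '.' || c == '/' || c == '_' || c == '-'

def split_string_and_number_alt (input_string : String) : String × Option String × String :=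
  let cs := input_string.toList
  let pre := cs.takeWhile (fun c => !c.isDigit)
  let rest := cs.drop pre.length
  match rest with
  | [] => (input_string, none, "")
  | _ :: _ =>
    let num := rest.takeWhile pvIsTok
    (String.ofList pre, some (String.ofList num), String.ofList (rest.drop num.length))

-- ===== PRECONDITION & SPEC =====
def Spec_split_string_and_number (input_string : String) (out : String × Option String × String) : Prop := out = split_string_and_number_alt input_string
instance (input_string : String) (out : String × Option String × String) : Decidable (Spec_split_string_and_number input_string out) := by unfold Spec_split_string_and_number; infer_instance

-- ===== CLAIM (what is proved, stated in full; the proofs are below) =====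
def Claim_equal_split_string_and_number : Prop := ∀ (input_string : String), Dom_split_string_and_number input_string → Spec_split_string_and_number input_string (split_string_and_number input_string)

-- ===== LEMMAS AND PROOFS =====

-- takeWhile p cs = cs.take i when p holds strictly before i and fails at i
theorem pv_takeWhile_eq_take {p : Char → Bool} :
    ∀ (cs : List Char) (i : Nat) (hi : i < cs.length),
    (∀ k (hk : k < cs.length), k < i → p (cs[k]'hk) = true) →
    p (cs[i]'hi) = false →
    cs.takeWhile p = cs.take i := by
  intro cs
  induction cs with
  | nil => intro i hi; simp at hi
  | cons c cs ih =>
    intro i hi hall hstop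
    cases i with
    | zero => simp at hstop; simp [List.takeWhile, hstop]
    | succ i =>
      have h0 : p c = true := hall 0 (Nat.succ_pos _) (Nat.succ_pos i)
      simp only [List.takeWhile, h0, List.take_succ_cons]
      have := ih i (by simpa using hi)
        (fun k hk hki => hall (k+1) (by omega) (by omega)) (by simpa using hstop)
      simp [this]

theorem pv_takeWhile_eq_self {p : Char → Bool} :
    ∀ (cs : List Char), (∀ k (hk : k < cs.length), p (cs[k]'hk) = true) →
    cs.takeWhile p = cs := by
  intro cs hall
  rw [List.takeWhile_eq_self_iff]
  intro x hx
  obtain ⟨k, hk, rfl⟩ := List.mem_iff_getElem.mp hx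
  exact hall k hk

-- cs.take (cs.takeWhile p).length = cs.takeWhile p
theorem pv_take_len_takeWhile {p : Char → Bool} :
    ∀ (cs : List Char), cs.take (cs.takeWhile p).length = cs.takeWhile p := by
  intro cs
  induction cs with
  | nil => simp
  | cons c cs ih =>
    by_cases h : p c = true
    · simp [List.takeWhile, h, ih]
    · simp [List.takeWhile, Bool.of_not_eq_true h]

-- the while-loop computes i + length of the maximal pvIsTok-run from i
theorem pv_aWhile_eq : ∀ (cs : List Char) (i : Nat), i ≤ cs.length →
    pvAWhile cs i = i + ((cs.drop i).takeWhile pvIsTok).length := by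
  intro cs i
  induction' hfuel : cs.length - i using Nat.strong_induction_on with n ih generalizing i
  intro hi
  rw [pvAWhile]
  by_cases h : i < cs.length
  · have hdrop : cs.drop i = cs[i] :: cs.drop (i+1) := List.drop_eq_getElem_cons h
    by_cases ht : pvIsTok cs[i] = true
    · have hrec := ih (cs.length - (i+1)) (by omega) (i+1) rfl (by omega)
      simp only [h, dif_pos]
      have ht' : (cs[i].isDigit || cs[i] == '.' || cs[i] == '/' || cs[i] == '_' || cs[i] == '-') = true := ht
      rw [if_pos ht', hrec, hdrop]
      simp [List.takeWhile, ht]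
      omega
    · have ht' : (cs[i].isDigit || cs[i] == '.' || cs[i] == '/' || cs[i] == '_' || cs[i] == '-') = false :=
        by simpa [pvIsTok] using ht
      simp only [h, dif_pos, ht']
      rw [hdrop]
      simp [List.takeWhile, ht]
  · have hieq : i = cs.length := by omega
    simp [hieq]

-- the for-loop, started at an index all of whose predecessors are non-digits, equals B's split
theorem pv_aFor_eq : ∀ (cs : List Char) (i : Nat) (s : String), cs = s.toList → i ≤ cs.length →
    (∀ k (hk : k < cs.length), k < i → (cs[k]'hk).isDigit = false) →
    pvAFor cs i = split_string_and_number_alt s := by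
  intro cs i
  induction' hfuel : cs.length - i using Nat.strong_induction_on with n ih generalizing i
  intro s hcs hi hall
  rw [pvAFor]
  by_cases h : i < cs.length
  · by_cases hd : cs[i].isDigit = true
    · rw [dif_pos h, if_pos hd]
      have hpre : cs.takeWhile (fun c => !c.isDigit) = cs.take i :=
        pv_takeWhile_eq_take cs i h (fun k hk hki => by simp [hall k hk hki]) (by simp [hd])
      have hlen2 : (List.take i cs).length = i := by
        simp [List.length_take]; omega
      have hrest : cs.drop i ≠ [] := by
        simp [List.drop_eq_nil_iff]; omega
      have htl := pv_aWhile_eq cs i (le_of_lt h)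
      unfold split_string_and_number_alt
      rw [← hcs]
      simp only [hpre, hlen2]
      rw [htl]
      cases hr : cs.drop i with
      | nil => exact absurd hr hrest
      | cons a as =>
        have h3 : cs.drop (i + ((a :: as).takeWhile pvIsTok).length)
            = (a :: as).drop ((a :: as).takeWhile pvIsTok).length := by
          rw [← hr, List.drop_drop]
        rw [Nat.add_sub_cancel_left, pv_take_len_takeWhile, h3]
    · have hd' : cs[i].isDigit = false := by simpa using hd
      rw [dif_pos h, if_neg (by simp [hd'])]
      exact ih (cs.length - (i+1)) (by omega) (i+1) rfl s hcs (by omega)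
        (fun k hk hki => by
          rcases Nat.lt_succ_iff_lt_or_eq.mp hki with hk' | hk'
          · exact hall k hk hk'
          · subst hk'; exact hd')
  · have hieq : i = cs.length := by omega
    simp only [h, dif_neg, not_false_iff]
    unfold split_string_and_number_alt
    have hpre : cs.takeWhile (fun c => !c.isDigit) = cs :=
      pv_takeWhile_eq_self cs (fun k hk => by simp [hall k hk (by omega)])
    rw [← hcs]
    simp only [hpre, List.drop_length]
    rw [hcs, String.ofList_toList]

-- ===== VERDICT (by name: the statement is the Claim_ definition above) =====
theorem split_string_and_number_spec : Claim_equal_split_string_and_number := by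
  intro s _
  unfold Spec_split_string_and_number split_string_and_number
  exact pv_aFor_eq s.toList 0 s rfl (Nat.zero_le _) (fun k hk hki => absurd hki (Nat.not_lt_zero k))
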